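-- pv_equiv track=rewrite | github.com/lucian-ilie/E-score | distances_and_extracting_local_alignments.py | find_nth_non_dash
-- ===== SOURCE A (Python) =====
-- def find_nth_non_dash(s, n):
--     count = 0  # To count non-dash characters
--     for i, char in enumerate(s):
--         if char != '-':
--             count += 1
--             if count == n:
--                 return i
--     return -1
-- ===== SOURCE B (Python) =====
-- def find_nth_non_dash(s, n):
--     positions = [i for i, c in enumerate(s) if c != '-']
--     if 0 < n <= len(positions):
--         return positions[n - 1]
--     return -1
-- ===== Notes on version B (the rewrite author's own statement) =====
-- stated objective: alternative
-- what changed: B first collects the full list of non-dash indices with a comprehension and then selects the nth by a guarded index lookup, instead of A's fused counting loop with early return.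
import Mathlib
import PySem

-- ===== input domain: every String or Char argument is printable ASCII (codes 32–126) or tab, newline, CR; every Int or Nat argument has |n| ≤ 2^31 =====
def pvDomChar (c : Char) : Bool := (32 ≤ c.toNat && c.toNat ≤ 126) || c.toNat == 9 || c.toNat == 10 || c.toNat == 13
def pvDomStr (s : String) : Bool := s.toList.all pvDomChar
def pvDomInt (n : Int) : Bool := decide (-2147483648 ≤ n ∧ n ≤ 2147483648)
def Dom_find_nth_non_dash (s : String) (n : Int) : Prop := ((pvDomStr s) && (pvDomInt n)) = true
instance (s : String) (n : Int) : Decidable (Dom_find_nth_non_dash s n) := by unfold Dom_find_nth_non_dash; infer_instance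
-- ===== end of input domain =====

-- B replaces A's fused counting loop (early return) by collecting all non-dash
-- indices once and selecting the nth with a guarded lookup (objective: alternative decomposition).

-- ===== PORT A =====
-- the loop of A: walk the characters with their index, counting non-dash chars,
-- returning the index when the count reaches n
def findNthGo : List Char → Int → Int → Int → Int
  | [], _, _, _ => -1
  | c :: rest, i, count, n =>
    if c ≠ '-' then
      if count + 1 = n then i else findNthGo rest (i + 1) (count + 1) n
    else findNthGo rest (i + 1) count n

def find_nth_non_dash (s : String) (n : Int) : Int :=
  findNthGo s.toList 0 0 n

-- ===== PORT B =====
def find_nth_non_dash_alt (s : String) (n : Int) : Int :=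
  let positions : List Int :=
    ((s.toList.zipIdx).filter (fun p => p.1 != '-')).map (fun p => (p.2 : Int))
  if 0 < n ∧ n ≤ positions.length then positions.getD (n - 1).toNat (-1) else -1

-- ===== PRECONDITION & SPEC =====
def Spec_find_nth_non_dash (s : String) (n : Int) (out : Int) : Prop := out = find_nth_non_dash_alt s n
instance (s : String) (n : Int) (out : Int) : Decidable (Spec_find_nth_non_dash s n out) := by unfold Spec_find_nth_non_dash; infer_instance

-- ===== CLAIM (what is proved, stated in full; the proofs are below) =====
def Claim_equal_find_nth_non_dash : Prop := ∀ (s : String) (n : Int), Dom_find_nth_non_dash s n → Spec_find_nth_non_dash s n (find_nth_non_dash s n)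

-- ===== LEMMAS AND PROOFS =====

-- B's positions list, for a suffix of the string starting at index k
def posOf (cs : List Char) (k : Nat) : List Int :=
  ((cs.zipIdx k).filter (fun p => p.1 != '-')).map (fun p => (p.2 : Int))

lemma posOf_nil (k : Nat) : posOf [] k = [] := rfl

lemma posOf_cons (c : Char) (cs : List Char) (k : Nat) :
    posOf (c :: cs) k =
      if c ≠ '-' then ((k : Int)) :: posOf cs (k + 1) else posOf cs (k + 1) := by
  simp [posOf, List.zipIdx_cons, List.filter_cons]
  by_cases h : c = '-' <;> simp [h]

-- the counter in A's loop only shifts the target n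
lemma findNthGo_shift (cs : List Char) : ∀ (i cnt n : Int),
    findNthGo cs i cnt n = findNthGo cs i 0 (n - cnt) := by
  induction cs with
  | nil => intro i cnt n; simp [findNthGo]
  | cons c cs ih =>
    intro i cnt n
    rw [findNthGo, findNthGo]
    by_cases hc : c = '-'
    · simp only [hc, ne_eq, not_true_eq_false, if_false]
      exact ih _ _ _
    · have hiff : (cnt + 1 = n) ↔ ((0 : Int) + 1 = n - cnt) := by omega
      simp only [hc, ne_eq, not_false_iff, if_true, hiff]
      by_cases hn : (0 : Int) + 1 = n - cnt
      · simp [hn]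
      · simp only [hn, if_false]
        have harg : n - (cnt + 1) = n - cnt - ((0 : Int) + 1) := by omega
        rw [ih (i + 1) (cnt + 1) n, ih (i + 1) ((0 : Int) + 1) (n - cnt), harg]

-- A's loop equals B's guarded lookup into the collected positions
lemma findNthGo_eq_pick (cs : List Char) : ∀ (k : Nat) (n : Int),
    findNthGo cs (k : Int) 0 n =
      (if 0 < n ∧ n ≤ (posOf cs k).length then (posOf cs k).getD (n - 1).toNat (-1) else -1) := by
  induction cs with
  | nil => intro k n; simp [findNthGo, posOf_nil]
  | cons c cs ih =>
    intro k n
    have ihk : findNthGo cs ((k : Int) + 1) 0 n =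
        (if 0 < n ∧ n ≤ (posOf cs (k + 1)).length then (posOf cs (k + 1)).getD (n - 1).toNat (-1) else -1) := by
      have := ih (k + 1) n
      rwa [Nat.cast_add, Nat.cast_one] at this
    by_cases hc : c = '-'
    · have hstep : findNthGo (c :: cs) (k : Int) 0 n = findNthGo cs ((k : Int) + 1) 0 n := by
        simp [findNthGo, hc]
      rw [hstep, ihk, posOf_cons]
      simp [hc]
    · rw [posOf_cons]
      simp only [hc, ne_eq, not_false_iff, if_true]
      have hlen : (((k : Int) :: posOf cs (k + 1)).length : Int) = ((posOf cs (k + 1)).length : Int) + 1 := by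
        simp
      by_cases hn : n = 1
      · subst hn
        have hcond : (0 : Int) < 1 ∧ (1 : Int) ≤ (((k : Int) :: posOf cs (k + 1)).length : Int) := by
          constructor
          · omega
          · rw [hlen]; omega
        rw [if_pos hcond]
        simp [findNthGo, hc, List.getD]
      · have hstep : findNthGo (c :: cs) (k : Int) 0 n = findNthGo cs ((k : Int) + 1) 0 (n - 1) := by
          have h1 : ¬ ((0 : Int) + 1 = n) := by omega
          rw [findNthGo]
          simp only [hc, ne_eq, not_false_iff, if_true, h1, if_false]
          rw [findNthGo_shift]
          norm_num
        have ihk' : findNthGo cs ((k : Int) + 1) 0 (n - 1) =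
            (if 0 < n - 1 ∧ n - 1 ≤ (posOf cs (k + 1)).length then (posOf cs (k + 1)).getD (n - 1 - 1).toNat (-1) else -1) := by
          have := ih (k + 1) (n - 1)
          rwa [Nat.cast_add, Nat.cast_one] at this
        rw [hstep, ihk']
        by_cases h1 : 0 < n - 1 ∧ n - 1 ≤ ((posOf cs (k + 1)).length : Int)
        · have h2 : 0 < n ∧ n ≤ (((k : Int) :: posOf cs (k + 1)).length : Int) := by
            constructor
            · omega
            · rw [hlen]; omega
          rw [if_pos h1, if_pos h2]
          have hidx : (n - 1).toNat = (n - 1 - 1).toNat + 1 := by omega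
          rw [hidx, List.getD_cons_succ]
        · have h2 : ¬ (0 < n ∧ n ≤ (((k : Int) :: posOf cs (k + 1)).length : Int)) := by
            rw [hlen]; omega
          rw [if_neg h1, if_neg h2]

-- ===== VERDICT (by name: the statement is the Claim_ definition above) =====
theorem find_nth_non_dash_spec : Claim_equal_find_nth_non_dash := by
  intro s n _
  unfold Spec_find_nth_non_dash find_nth_non_dash find_nth_non_dash_alt
  have := findNthGo_eq_pick s.toList 0 n
  simpa [posOf] using this
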